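-- pv_equiv track=rewrite | github.com/ymzhang0/sabr | src/aris_apps/aiida/agent/researcher.py | _collect_common_mapping_values
-- ===== SOURCE A (Python) =====
-- import copy
-- from typing import Any, Mapping, Sequence
--
-- def _collect_common_mapping_values(items: Sequence[Mapping[str, Any]]) -> dict[str, Any]:
--     normalized_items = [dict(item) for item in items if isinstance(item, Mapping)]
--     if not normalized_items:
--         return {}
--
--     common = copy.deepcopy(normalized_items[0])
--     for key in list(common.keys()):
--         for candidate in normalized_items[1:]:
--             if key not in candidate or candidate[key] != common[key]:
--                 common.pop(key, None)
--                 break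
--     return common
-- ===== SOURCE B (Python) =====
-- import copy
-- from typing import Any, Mapping, Sequence
--
--
-- def _collect_common_mapping_values(items: Sequence[Mapping[str, Any]]) -> dict[str, Any]:
--     normalized_items = [dict(item) for item in items if isinstance(item, Mapping)]
--     if not normalized_items:
--         return {}
--
--     # Index every (key, value) pair once; a pair is common to all mappings
--     # exactly when its count equals the number of mappings (keys are unique
--     # inside each dict, so each dict contributes a given pair at most once).
--     n = len(normalized_items)
--     pair_counts = {}
--     for d in normalized_items:
--         for pair in d.items():
--             pair_counts[pair] = pair_counts.get(pair, 0) + 1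
--     return {k: v for k, v in copy.deepcopy(normalized_items[0]).items()
--             if pair_counts.get((k, v), 0) == n}
-- ===== Notes on version B (the rewrite author's own statement) =====
-- stated objective: alternative
-- what changed: B replaces A's keys-outer loop with an inner scan over the other items (pop-and-break) by a different data structure: a (key, value) pair-frequency dict built in one pass over all items, after which a pair of the first item is kept iff its count equals the number of mappings.
import Mathlib
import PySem

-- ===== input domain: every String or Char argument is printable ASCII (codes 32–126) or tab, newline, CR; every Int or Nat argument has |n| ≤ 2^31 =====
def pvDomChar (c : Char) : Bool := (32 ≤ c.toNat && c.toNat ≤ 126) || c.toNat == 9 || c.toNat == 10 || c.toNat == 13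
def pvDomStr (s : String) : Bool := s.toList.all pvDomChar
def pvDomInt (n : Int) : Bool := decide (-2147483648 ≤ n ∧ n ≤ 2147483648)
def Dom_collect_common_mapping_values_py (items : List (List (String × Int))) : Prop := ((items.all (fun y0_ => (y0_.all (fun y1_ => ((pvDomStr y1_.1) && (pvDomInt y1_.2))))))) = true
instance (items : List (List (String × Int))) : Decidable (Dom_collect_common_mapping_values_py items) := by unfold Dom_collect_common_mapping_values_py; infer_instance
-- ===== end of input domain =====

-- B replaces A's keys-outer / candidates-inner scan (pop-and-break) by a one-pass (key, value)
-- frequency index: a pair is common iff its count equals the number of mappings (alternative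
-- data structure; return value only — neither version mutates its argument).

-- ===== PORT A =====
-- inner 'for candidate in normalized_items[1:]: … pop + break' loop of A
def pvCheckA (k : String) (c : PySem.Dict String Int) : List (PySem.Dict String Int) → PySem.Dict String Int
  | [] => c
  | cand :: more =>
      if !cand.contains k || !(cand.getD k 0 == c.getD k 0) then c.erase k
      else pvCheckA k c more

def collect_common_mapping_values_py (items : List (List (String × Int))) : List (String × Int) :=
  let normalized_items := items.map (fun it => PySem.Dict.ofList it)
  match normalized_items with
  | [] => []
  | first :: rest =>
      -- common = deepcopy(first); for key in list(common.keys()): inner loop (pvCheckA)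
      let common := first.keys.foldl (fun c k => pvCheckA k c rest) first
      common.items

-- ===== PORT B =====
def collect_common_mapping_values_py_alt (items : List (List (String × Int))) : List (String × Int) :=
  match items.map (fun it => PySem.Dict.ofList it) with
  | [] => []
  | first :: rest =>
      let normalized_items := first :: rest
      let n : Int := normalized_items.length
      -- pair_counts[pair] = pair_counts.get(pair, 0) + 1, over every item's pairs
      let pair_counts := normalized_items.foldl
        (fun c d => d.items.foldl (fun c p => c.insert p (c.getD p 0 + 1)) c)
        PySem.Dict.empty
      -- {k: v for k, v in deepcopy(first).items() if pair_counts.get((k, v), 0) == n}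
      first.items.filter (fun p => pair_counts.getD p 0 == n)

-- ===== PRECONDITION & SPEC =====
def Spec_collect_common_mapping_values_py (items : List (List (String × Int))) (out : List (String × Int)) : Prop := out = collect_common_mapping_values_py_alt items
instance (items : List (List (String × Int))) (out : List (String × Int)) : Decidable (Spec_collect_common_mapping_values_py items out) := by unfold Spec_collect_common_mapping_values_py; infer_instance

-- ===== CLAIM (what is proved, stated in full; the proofs are below) =====
def Claim_equal_collect_common_mapping_values_py : Prop := ∀ (items : List (List (String × Int))), Dom_collect_common_mapping_values_py items → Spec_collect_common_mapping_values_py items (collect_common_mapping_values_py items)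

-- ===== LEMMAS AND PROOFS =====

-- the agreement condition A filters by
def pvCond (rest : List (PySem.Dict String Int)) (p : String × Int) : Bool :=
  rest.all (fun cand => cand.contains p.1 && (cand.getD p.1 0 == p.2))

-- A's inner break-loop is: keep c if every candidate agrees on k, else erase k
theorem pvCheckA_eq (k : String) (c : PySem.Dict String Int) :
    ∀ rest, pvCheckA k c rest =
      if rest.all (fun cand => cand.contains k && (cand.getD k 0 == c.getD k 0)) then c else c.erase k
  | [] => by simp [pvCheckA]
  | cand :: more => by
      cases hA : cand.contains k <;> cases hB : (cand.getD k 0 == c.getD k 0) <;>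
        simp [pvCheckA, hA, hB, pvCheckA_eq k c more]

theorem nodup_keys_mk_filter (l : List (String × Int)) (q : String × Int → Bool)
    (h : (l.map Prod.fst).Nodup) : ((PySem.Dict.mk (l.filter q)).keys).Nodup := by
  simp only [PySem.Dict.keys_mk]
  exact h.sublist (List.Sublist.map Prod.fst List.filter_sublist)

theorem erase_items (c : PySem.Dict String Int) (k : String) :
    (c.erase k).items = c.items.filter (fun p => !(p.1 == k)) := rfl

-- A's key-fold filters the first item's entries by agreement with every candidate
theorem A_fold (rest : List (PySem.Dict String Int)) :
    ∀ (ks : List String) (c : PySem.Dict String Int), (c.keys).Nodup →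
      ((ks.foldl (fun c k => pvCheckA k c rest) c).items) =
        c.items.filter (fun p => !(ks.contains p.1) || pvCond rest p)
  | [], c, _ => by simp
  | k :: ks, c, hnd => by
      rw [List.foldl_cons, pvCheckA_eq]
      have key : ∀ p ∈ c.items, p.1 = k → pvCond rest p =
          rest.all (fun cand => cand.contains k && (cand.getD k 0 == c.getD k 0)) := by
        intro p hp hpk
        have hv : c.getD k 0 = p.2 :=
          PySem.Dict.getD_of_mem_items c (by simpa [← hpk] using hp) hnd 0
        simp [pvCond, hpk, hv]
      by_cases hall : rest.all (fun cand => cand.contains k && (cand.getD k 0 == c.getD k 0)) = true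
      · rw [if_pos hall, A_fold rest ks c hnd, List.filter_congr]
        intro p hp
        by_cases hpk : p.1 = k
        · simp [hpk, key p hp hpk, hall]
        · simp [hpk]
      · rw [if_neg hall]
        have hnd' : ((c.erase k).keys).Nodup := by
          rw [show c.erase k = PySem.Dict.mk (c.items.filter (fun p => !(p.1 == k))) from rfl]
          exact nodup_keys_mk_filter _ _ hnd
        rw [A_fold rest ks _ hnd', erase_items, List.filter_filter]
        rw [List.filter_congr]
        intro p hp
        by_cases hpk : p.1 = k
        · have : pvCond rest p = false := by
            rw [key p hp hpk]; exact Bool.not_eq_true _ |>.mp hall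
          simp [hpk, this]
        · simp [hpk]

-- the counter's value at p is the total number of occurrences of p across all items lists
theorem counts_getD (p : String × Int) :
    ∀ (ds : List (PySem.Dict String Int)) (c : PySem.Dict (String × Int) Int),
      ((ds.foldl (fun c d => d.items.foldl (fun c q => c.insert q (c.getD q 0 + 1)) c) c).getD p 0)
        = c.getD p 0 + ((ds.map (fun d => (d.items.count p : Int))).sum)
  | [], c => by simp
  | d :: ds, c => by
      rw [List.foldl_cons, counts_getD p ds, PySem.Dict.getD_foldl_insert_add_one]
      simp; ring

-- items of a nodup-keys dict contain p at most once, exactly when contains/getD agree on p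
theorem count_items (d : PySem.Dict String Int) (hnd : (d.keys).Nodup) (p : String × Int) :
    d.items.count p = if d.contains p.1 && (d.getD p.1 0 == p.2) then 1 else 0 := by
  have hitems : d.items.Nodup := by
    have : (d.items.map Prod.fst).Nodup := hnd
    exact this.of_map
  by_cases hmem : p ∈ d.items
  · have h1 : d.contains p.1 = true :=
      (PySem.Dict.contains_iff_mem_keys d p.1).mpr (PySem.Dict.mem_keys_of_mem_items (d := d) hmem)
    have h2 : d.getD p.1 0 = p.2 := PySem.Dict.getD_of_mem_items d (by simpa using hmem) hnd 0
    rw [if_pos (by simp [h1, h2])]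
    exact le_antisymm (List.nodup_iff_count_le_one.mp hitems p) (List.count_pos_iff.mpr hmem)
  · rw [List.count_eq_zero_of_not_mem hmem, if_neg]
    intro hc
    simp only [Bool.and_eq_true, beq_iff_eq] at hc
    obtain ⟨hc1, hc2⟩ := hc
    have : ∃ v, (p.1, v) ∈ d.items := by
      have hk : p.1 ∈ d.keys := (PySem.Dict.contains_iff_mem_keys d p.1).mp hc1
      have : p.1 ∈ d.items.map Prod.fst := hk
      obtain ⟨q, hq, hq1⟩ := List.mem_map.mp this
      exact ⟨q.2, by simpa [← hq1] using hq⟩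
    obtain ⟨v, hv⟩ := this
    have : d.getD p.1 0 = v := PySem.Dict.getD_of_mem_items d hv hnd 0
    exact hmem (by rw [show p = (p.1, p.2) from rfl, ← hc2, this]; exact hv)

-- the per-candidate counts are bounded by the number of candidates …
theorem sum_le_len (p : String × Int) :
    ∀ (rest : List (PySem.Dict String Int)), (∀ d ∈ rest, (d.keys).Nodup) →
      ((rest.map (fun d => (d.items.count p : Int))).sum ≤ (rest.length : Int))
  | [], _ => by simp
  | d :: ds, h => by
      have hd : d.items.count p ≤ 1 := by
        rw [count_items d (h d (by simp)) p]; split <;> simp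
      have := sum_le_len p ds (fun d' hd' => h d' (List.mem_cons_of_mem _ hd'))
      simp only [List.map_cons, List.sum_cons, List.length_cons]
      push_cast
      omega

-- … and reach it exactly when every candidate agrees on p
theorem sum_eq_iff_all (p : String × Int) :
    ∀ (rest : List (PySem.Dict String Int)), (∀ d ∈ rest, (d.keys).Nodup) →
      (((rest.map (fun d => (d.items.count p : Int))).sum = (rest.length : Int)) ↔ pvCond rest p = true)
  | [], _ => by simp [pvCond]
  | d :: ds, h => by
      have hd := h d (by simp)
      have hih := sum_eq_iff_all p ds (fun d' hd' => h d' (List.mem_cons_of_mem _ hd'))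
      have hb := sum_le_len p ds (fun d' hd' => h d' (List.mem_cons_of_mem _ hd'))
      simp only [List.map_cons, List.sum_cons, List.length_cons, pvCond, List.all_cons,
        Bool.and_eq_true] at hih ⊢
      rw [count_items d hd p]
      by_cases hc : (d.contains p.1 && (d.getD p.1 0 == p.2)) = true
      · rw [if_pos hc]
        rw [Bool.and_eq_true] at hc
        constructor
        · intro h'
          refine ⟨hc, hih.mp ?_⟩
          push_cast at h'
          omega
        · rintro ⟨-, h2⟩
          have h3 := hih.mpr h2
          push_cast
          omega
      · rw [if_neg hc]
        constructor
        · intro h'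
          exfalso
          push_cast at h'
          omega
        · rintro ⟨h', -⟩
          exact absurd (by simp [h'.1, h'.2] :
            (d.contains p.1 && d.getD p.1 0 == p.2) = true) hc

-- ===== VERDICT (by name: the statement is the Claim_ definition above) =====
theorem collect_common_mapping_values_py_spec : Claim_equal_collect_common_mapping_values_py := by
  intro items _
  unfold Spec_collect_common_mapping_values_py
  unfold collect_common_mapping_values_py collect_common_mapping_values_py_alt
  cases items with
  | nil => rfl
  | cons a l =>
      simp only [List.map_cons]
      set first := PySem.Dict.ofList a with hfirst
      set rest := l.map (fun it => PySem.Dict.ofList it) with hrest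
      have hnd : (first.keys).Nodup := PySem.Dict.nodup_keys_ofList (κ := String) (ν := Int) a
      have hndr : ∀ d ∈ rest, (d.keys).Nodup := by
        intro d hd
        rw [hrest] at hd
        obtain ⟨it, _, hit⟩ := List.mem_map.mp hd
        exact hit ▸ PySem.Dict.nodup_keys_ofList (κ := String) (ν := Int) it
      rw [A_fold rest first.keys first hnd, List.filter_congr]
      intro p hp
      have hk : p.1 ∈ first.keys := PySem.Dict.mem_keys_of_mem_items (d := first) hp
      have hitems : first.items.Nodup := (by exact hnd : (first.items.map Prod.fst).Nodup).of_map
      have hcnt1 : first.items.count p = 1 :=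
        le_antisymm (List.nodup_iff_count_le_one.mp hitems p) (List.count_pos_iff.mpr hp)
      rw [counts_getD]
      simp only [List.map_cons, List.sum_cons, hcnt1, PySem.Dict.getD_empty]
      have hbk : (first.keys.contains p.1) = true := by simpa using hk
      simp only [hbk, Bool.not_true, Bool.false_or]
      rw [Bool.eq_iff_iff, beq_iff_eq, ← sum_eq_iff_all p rest hndr]
      push_cast [List.length_cons]
      constructor <;> intro h' <;> omega
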